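-- pv_equiv track=rewrite | github.com/suet-lee/swarm-warehouse | run_ex_multic.py | gen_batches
-- ===== SOURCE A (Python) =====
-- def gen_batches(iterations, no_procs):
--     per_batch = int(iterations/no_procs)
--     batches = []
--     for i in range(no_procs):
--         start = i*per_batch
--         end = min((i+1)*per_batch, iterations)
--         batch = list(range(start, end))
--         batches.append(batch)
--
--     if end < iterations:
--         remainder = list(range(end, iterations))
--         b_idx = 0
--         while len(remainder):
--             it = remainder.pop(0)
--             batches[b_idx].append(it)
--             b_idx = (b_idx+1)%len(batches)
--
--     return batches
-- ===== SOURCE B (Python) =====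
-- def gen_batches(iterations, no_procs):
--     per_batch = int(iterations/no_procs)
--     end = min(no_procs*per_batch, iterations)
--     r = iterations - end
--     return [list(range(i*per_batch, min((i+1)*per_batch, iterations)))
--             + ([end + i] if i < r else [])
--             for i in range(no_procs)]
-- ===== Notes on version B (the rewrite author's own statement) =====
-- stated objective: simpler
-- what changed: B replaces A's two phases (build batches, then round-robin distribute the remainder with a while/pop(0) loop) by a single comprehension that appends the remainder element end+i to batch i directly via the arithmetic condition i < r.
import Mathlib
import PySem

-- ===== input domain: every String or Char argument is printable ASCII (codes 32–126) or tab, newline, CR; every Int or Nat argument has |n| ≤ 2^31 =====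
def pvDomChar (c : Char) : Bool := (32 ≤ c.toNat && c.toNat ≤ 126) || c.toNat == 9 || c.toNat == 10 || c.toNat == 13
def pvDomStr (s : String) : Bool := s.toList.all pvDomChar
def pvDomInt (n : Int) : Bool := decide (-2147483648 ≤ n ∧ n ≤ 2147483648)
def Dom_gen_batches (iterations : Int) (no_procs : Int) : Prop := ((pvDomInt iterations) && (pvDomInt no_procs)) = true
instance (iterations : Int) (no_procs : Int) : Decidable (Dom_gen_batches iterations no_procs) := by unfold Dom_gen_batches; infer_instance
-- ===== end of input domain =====

-- B replaces A's second phase (remainder list + while/pop(0) round-robin loop) by appending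
-- the remainder element end+i to batch i directly inside one comprehension (objective: simpler).

-- ===== PORT A =====
-- the while-loop: pops remainder head, appends it to batches[b_idx], steps b_idx = (b_idx+1) % len(batches)
def distribLoop : List Int → Int → List (List Int) → List (List Int)
  | [], _, batches => batches
  | it :: rest, b_idx, batches =>
      distribLoop rest (PySem.Int.mod (b_idx + 1) batches.length)
        (batches.modify b_idx.toNat (fun b => b ++ [it]))

def gen_batches (iterations : Int) (no_procs : Int) : List (List Int) :=
  -- int(iterations/no_procs): on Dom (|args| ≤ 2^31) the float quotient never rounds across an
  -- integer, so int() of it is exact truncating division = Int.tdiv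
  let per_batch := Int.tdiv iterations no_procs
  -- Python's `end` is unbound before the loop (UnboundLocalError when no_procs < 0, outside Pre_);
  -- we carry it in the fold state, initialised arbitrarily to 0
  let st := (PySem.List.pyRange 0 no_procs 1).foldl
    (fun (st : List (List Int) × Int) i =>
      let start := i * per_batch
      let endv := min ((i + 1) * per_batch) iterations
      (st.1 ++ [PySem.List.pyRange start endv 1], endv))
    ([], 0)
  if st.2 < iterations then
    distribLoop (PySem.List.pyRange st.2 iterations 1) 0 st.1
  else st.1

-- ===== PORT B =====
def gen_batches_alt (iterations : Int) (no_procs : Int) : List (List Int) :=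
  let per_batch := Int.tdiv iterations no_procs   -- int(iterations/no_procs), exact on Dom as above
  let endv := min (no_procs * per_batch) iterations
  let r := iterations - endv
  (PySem.List.pyRange 0 no_procs 1).map (fun i =>
    PySem.List.pyRange (i * per_batch) (min ((i + 1) * per_batch) iterations) 1
      ++ (if i < r then [endv + i] else []))

-- ===== PRECONDITION & SPEC =====
-- Pre_ excludes no_procs ≤ 0, where A raises: ZeroDivisionError (no_procs = 0) or
-- UnboundLocalError on `end` (no_procs < 0).
def Pre_gen_batches (iterations : Int) (no_procs : Int) : Prop := 1 ≤ no_procs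
instance (iterations : Int) (no_procs : Int) : Decidable (Pre_gen_batches iterations no_procs) := by unfold Pre_gen_batches; infer_instance
def pvWitness_gen_batches : Int × Int := (7, 3)

def Spec_gen_batches (iterations : Int) (no_procs : Int) (out : List (List Int)) : Prop := out = gen_batches_alt iterations no_procs
instance (iterations : Int) (no_procs : Int) (out : List (List Int)) : Decidable (Spec_gen_batches iterations no_procs out) := by unfold Spec_gen_batches; infer_instance

-- ===== CLAIM (what is proved, stated in full; the proofs are below) =====
def Claim_equal_gen_batches : Prop := ∀ (iterations : Int) (no_procs : Int), Dom_gen_batches iterations no_procs → Pre_gen_batches iterations no_procs → Spec_gen_batches iterations no_procs (gen_batches iterations no_procs)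

-- ===== LEMMAS AND PROOFS =====

lemma distribLoop_length (rem : List Int) : ∀ (j : Int) (L : List (List Int)),
    (distribLoop rem j L).length = L.length := by
  induction rem with
  | nil => intro j L; rfl
  | cons x rest ih => intro j L; simp [distribLoop, ih]

lemma distribLoop_get (m : Nat) : ∀ (e : Int) (j : Nat) (L : List (List Int)),
    j + m ≤ L.length → ∀ (k : Nat) (hk : k < L.length),
    (distribLoop (PySem.List.pyRange e (e + (m : Int)) 1) (j : Int) L)[k]?
      = some (if j ≤ k ∧ k < j + m then L[k] ++ [e + ((k : Int) - (j : Int))] else L[k]) := by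
  induction m with
  | zero =>
    intro e j L _ k hk
    rw [PySem.List.pyRange_one_eq_nil (by omega), if_neg (by omega)]
    simp [distribLoop, List.getElem?_eq_getElem hk]
  | succ m ih =>
    intro e j L hle k hk
    have hcast : e + ((m + 1 : Nat) : Int) = e + 1 + (m : Int) := by push_cast; ring
    rw [hcast, PySem.List.pyRange_one_cons (by omega)]
    simp only [distribLoop, Int.toNat_natCast]
    have hjlen : j < L.length := by omega
    have hlen' : (L.modify j (fun b => b ++ [e])).length = L.length := by simp
    by_cases hwrap : j + 1 = L.length
    · -- then m = 0 and the rest of the remainder is empty: the wrapped b_idx is never used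
      have hm : m = 0 := by omega
      subst hm
      rw [show (e + 1 + ((0 : Nat) : Int)) = e + 1 by push_cast; ring,
          PySem.List.pyRange_one_eq_nil le_rfl]
      simp only [distribLoop, List.getElem?_modify]
      rw [List.getElem?_eq_getElem hk]
      simp only [Option.map_eq_map, Option.map_some]
      by_cases hkj : j = k
      · subst hkj
        rw [if_pos rfl, if_pos (by omega)]
        simp
      · rw [if_neg hkj, if_neg (by omega)]
    · have hmod : PySem.Int.mod ((j : Int) + 1) (L.length : Int) = ((j + 1 : Nat) : Int) := by
        rw [show ((j : Int) + 1) = ((j + 1 : Nat) : Int) by push_cast; ring,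
            PySem.Int.mod_eq_emod_of_pos (by exact_mod_cast (by omega : 0 < L.length))]
        exact Int.emod_eq_of_lt (by positivity) (by exact_mod_cast (by omega : j + 1 < L.length))
      have h1 : j + 1 + m ≤ (L.modify j (fun b => b ++ [e])).length := by
        rw [hlen']; omega
      have h2 : k < (L.modify j (fun b => b ++ [e])).length := by
        rw [hlen']; exact hk
      have hih := ih (e + 1) (j + 1) (L.modify j (fun b => b ++ [e])) h1 k h2
      rw [hmod, hih, List.getElem_modify]
      by_cases hkj : j = k
      · subst hkj
        rw [if_neg (by omega : ¬ (j + 1 ≤ j ∧ j < j + 1 + m)), if_pos rfl,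
            if_pos (by omega : j ≤ j ∧ j < j + (m + 1))]
        simp
      · rw [if_neg hkj]
        by_cases hin : j + 1 ≤ k ∧ k < j + 1 + m
        · rw [if_pos hin, if_pos (by omega : j ≤ k ∧ k < j + (m + 1))]
          rw [show e + 1 + ((k : Int) - ((j + 1 : Nat) : Int)) = e + ((k : Int) - (j : Int)) by
            push_cast; ring]
        · rw [if_neg hin, if_neg (by omega : ¬ (j ≤ k ∧ k < j + (m + 1)))]

-- phase 2 of A as a whole: round-robin distribution over batches given as a map over a range
lemma final_eq (F : Int → List Int) (n : Nat) (e it : Int) (hle : e ≤ it)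
    (hrn : it - e ≤ (n : Int)) :
    distribLoop (PySem.List.pyRange e it 1) 0 ((PySem.List.pyRange 0 (n : Int) 1).map F)
      = (PySem.List.pyRange 0 (n : Int) 1).map
          (fun i => F i ++ if i < it - e then [e + i] else []) := by
  rw [show it = e + (((it - e).toNat : Nat) : Int) by omega]
  set m := (it - e).toNat with hm
  apply List.ext_getElem?
  intro k
  have hlenL : ((PySem.List.pyRange 0 (n : Int) 1).map F).length = n := by
    simp [PySem.List.length_pyRange_one]
  by_cases hklt : k < n
  · have hdg := distribLoop_get m e 0 ((PySem.List.pyRange 0 (n : Int) 1).map F)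
      (by rw [hlenL]; omega) k (by rw [hlenL]; exact hklt)
    simp only [Nat.cast_zero] at hdg
    rw [hdg]
    rw [List.getElem?_eq_getElem (by simp [PySem.List.length_pyRange_one]; omega)]
    simp only [List.getElem_map, PySem.List.getElem_pyRange_one]
    by_cases hkr : k < m
    · rw [if_pos (by omega), if_pos (by omega : (0 : Int) + (k : Int) < e + (m : Int) - e)]
      simp
    · rw [if_neg (by omega), if_neg (by omega : ¬ (0 : Int) + (k : Int) < e + (m : Int) - e)]
      simp
  · rw [List.getElem?_eq_none (by rw [distribLoop_length, hlenL]; omega),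
        List.getElem?_eq_none (by simp [PySem.List.length_pyRange_one]; omega)]

-- phase 1 of A: the batches list and the final value of `end`, for n ≥ 1 loop iterations
lemma loop1 (pb it e0 : Int) : ∀ (n : Nat),
    ((PySem.List.pyRange 0 (n : Int) 1).foldl
      (fun (st : List (List Int) × Int) i =>
        (st.1 ++ [PySem.List.pyRange (i * pb) (min ((i + 1) * pb) it) 1],
         min ((i + 1) * pb) it))
      ([], e0))
    = ((PySem.List.pyRange 0 (n : Int) 1).map
        (fun i => PySem.List.pyRange (i * pb) (min ((i + 1) * pb) it) 1),
       if n = 0 then e0 else min ((n : Int) * pb) it) := by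
  intro n
  induction n with
  | zero => simp [PySem.List.pyRange_one_eq_nil (le_refl (0 : Int))]
  | succ n ih =>
    rw [show ((n + 1 : Nat) : Int) = (n : Int) + 1 by push_cast; ring,
        PySem.List.pyRange_one_succ_right (by positivity)]
    simp only [List.foldl_append, List.map_append, List.foldl_cons, List.foldl_nil,
      List.map_cons, List.map_nil, ih]
    simp

-- bounds for the remainder r = it - min(np*pb, it) where pb = tdiv it np, np ≥ 1
lemma remainder_bounds (it np : Int) (hnp : 1 ≤ np) :
    0 ≤ it - min (np * Int.tdiv it np) it ∧ it - min (np * Int.tdiv it np) it < np := by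
  by_cases hit : 0 ≤ it
  · rw [Int.tdiv_eq_ediv_of_nonneg hit]
    have h1 := Int.emod_nonneg it (by omega : np ≠ 0)
    have h2 := Int.emod_lt_of_pos it (by omega : 0 < np)
    have h3 := Int.mul_ediv_add_emod it np
    rw [min_eq_left (by omega)]
    omega
  · have hle : it ≤ np * Int.tdiv it np := by
      have h3 : np * Int.tdiv it np + Int.tmod it np = it := Int.mul_tdiv_add_tmod it np
      have h4 : 0 ≤ Int.tmod (-it) np := Int.tmod_nonneg np (by omega)
      rw [Int.neg_tmod] at h4
      omega
    rw [min_eq_right hle]; omega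

theorem gen_batches_eq (it np : Int) (hnp : 1 ≤ np) :
    gen_batches it np = gen_batches_alt it np := by
  have hnp' : ((np.toNat : Nat) : Int) = np := Int.toNat_of_nonneg (by omega)
  set pb := Int.tdiv it np with hpb
  set n := np.toNat with hn
  simp only [gen_batches, gen_batches_alt]
  rw [← hpb, ← hnp', loop1 pb it 0 n]
  simp only [if_neg (by omega : ¬ n = 0)]
  have hb := remainder_bounds it np hnp
  rw [← hpb, ← hnp'] at hb
  set e := min ((n : Int) * pb) it with he
  by_cases hlt : e < it
  · rw [if_pos hlt]
    exact final_eq _ n e it (le_of_lt hlt) (by omega)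
  · rw [if_neg hlt]
    apply List.map_congr_left
    intro i hi
    have hi' := (PySem.List.mem_pyRange_one).mp hi
    rw [if_neg (by omega : ¬ i < it - e)]
    simp

-- ===== VERDICT (by name: the statement is the Claim_ definition above) =====
theorem gen_batches_spec : Claim_equal_gen_batches := by
  intro it np _ hpre
  unfold Spec_gen_batches
  exact gen_batches_eq it np hpre
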